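-- pv_equiv track=rewrite | github.com/ict-cspark/TIL | Algorithm/Programmers/Level3/level3_N으로_표현.py | solution
-- ===== SOURCE A (Python) =====
-- def solution(N, number):
--     dp = []                             # dp 리스트 생성
--     for i in range(1, 9):               # 반복문을 8번 실행 하여 N으로 구성된 초기 set이 담긴 리스트 생성
--         dp.append(set([int(str(N)*i)]))
--
--     for i in range(8):                  # 8번 반복문 실행
--         for j in range(i):
--             for x in dp[j]:             # dp[j]의 원소 갯수만큼 반복문 실행
--                 for y in dp[i-j-1]:     # dp[i-j-1] 의 원소갯수만큼 반복문 실행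
--                     dp[i].add(x+y)      # 4칙연산 수행하여 dp[i] 에 추가
--                     dp[i].add(x-y)
--                     dp[i].add(x*y)
--                     if y != 0:
--                         dp[i].add(x//y)
--
--         if number in dp[i]:             # dp[i]에 number 값이 있을 경우 i + 1 을 리턴
--             return i + 1
--     return -1
-- ===== SOURCE B (Python) =====
-- def solution(N, number):
--     memo = {}
--
--     def reach(c):
--         if c in memo:
--             return memo[c]
--         res = {int(str(N) * c)}
--         for j in range(1, c):
--             a, b = reach(j), reach(c - j)
--             res |= {x + y for x in a for y in b}
--             res |= {x - y for x in a for y in b}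
--             res |= {x * y for x in a for y in b}
--             res |= {x // y for x in a for y in b if y != 0}
--         memo[c] = res
--         return res
--
--     for c in range(1, 9):
--         if number in reach(c):
--             return c
--     return -1
-- ===== Notes on version B (the rewrite author's own statement) =====
-- stated objective: alternative
-- what changed: Replaces A's bottom-up dp table (8 pre-allocated singleton sets mutated in place by a quadruple nested loop of element-wise .add calls) with a memoized top-down recursion reach(c) that builds each level from set-comprehension unions over the splits j + (c-j).
import Mathlib
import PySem

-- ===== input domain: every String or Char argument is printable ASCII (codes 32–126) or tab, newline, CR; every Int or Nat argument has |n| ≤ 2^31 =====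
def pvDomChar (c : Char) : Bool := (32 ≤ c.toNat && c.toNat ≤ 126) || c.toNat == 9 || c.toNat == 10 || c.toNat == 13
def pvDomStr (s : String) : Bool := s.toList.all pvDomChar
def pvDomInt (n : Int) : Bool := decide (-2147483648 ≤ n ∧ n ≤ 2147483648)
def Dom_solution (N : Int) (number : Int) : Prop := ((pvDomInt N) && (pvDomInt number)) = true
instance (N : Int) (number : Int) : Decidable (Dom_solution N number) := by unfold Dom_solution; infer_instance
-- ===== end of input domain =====

-- B replaces A's bottom-up dp table of 8 pre-allocated sets mutated by a triple nested loop with a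
-- memoized top-down recursion reach(c) built from set-comprehension unions; same return value (alternative decomposition).

-- ===== PORT A =====
-- int(str(N)*k): shared by both ports (both Pythons compute this literal expression).
-- Outside Pre_ (N < 0 and k ≥ 2) Python raises ValueError; the `.getD 0` arm carries no claim there.
def pvRep (s : List Char) : Nat → List Char
  | 0 => []
  | k + 1 => s ++ pvRep s k

def pvBase (N : Int) (k : Nat) : Int :=
  (PySem.Int.ofChars? (pvRep (PySem.Int.toChars N) k)).getD 0

-- the inner double loop 'for x in dp[j]: for y in dp[i-j-1]: dp[i].add(...)' threading dp[i]'s set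
def pvCombineA (s : PySem.Set Int) (a b : List Int) : PySem.Set Int :=
  a.foldl (fun s x =>
    b.foldl (fun s y =>
      let s2 := PySem.Set.add (PySem.Set.add (PySem.Set.add s (x + y)) (x - y)) (x * y)
      if y ≠ 0 then PySem.Set.add s2 (PySem.Int.floordiv x y) else s2) s) s

-- 'for j in range(i): …' (only dp[i] is written; dp[j], dp[i-j-1] have j, i-j-1 < i)
def pvStepA (dp : List (PySem.Set Int)) (i : Int) : List (PySem.Set Int) :=
  (PySem.List.pyRange 0 i 1).foldl (fun dp j =>
    PySem.List.pySetD dp i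
      (pvCombineA (PySem.List.pyGetD dp i []) (PySem.List.pyGetD dp j [])
        (PySem.List.pyGetD dp (i - j - 1) []))) dp

-- 'for i in range(8): … if number in dp[i]: return i+1' with early return
def pvLoopA (number : Int) : List (PySem.Set Int) → List Int → Int
  | _, [] => -1
  | dp, i :: rest =>
    let dp2 := pvStepA dp i
    if PySem.Set.contains (PySem.List.pyGetD dp2 i []) number then i + 1
    else pvLoopA number dp2 rest

def solution (N : Int) (number : Int) : Int :=
  let dp := (PySem.List.pyRange 1 9 1).foldl
    (fun dp i => dp ++ [PySem.Set.ofList [pvBase N i.toNat]]) []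
  pvLoopA number dp (PySem.List.pyRange 0 8 1)

-- ===== PORT B =====
-- {f(x, y) for x in a for y in b}
def pvPairsB (f : Int → Int → Int) (a b : List Int) : List Int :=
  a.flatMap (fun x => b.map (fun y => f x y))

-- {x // y for x in a for y in b if y != 0}
def pvDivPairsB (a b : List Int) : List Int :=
  a.flatMap (fun x => (b.filter (fun y => y ≠ 0)).map (fun y => PySem.Int.floordiv x y))

-- memoized recursion reach(c); the memo dict is threaded through explicitly
def pvReachB (N : Int) (c : Nat) (memo : PySem.Dict Nat (PySem.Set Int)) :
    PySem.Set Int × PySem.Dict Nat (PySem.Set Int) :=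
  match memo.get? c with
  | some s => (s, memo)
  | none =>
    let p := (PySem.List.pyRange 1 (c : Int) 1).attach.foldl
      (fun (p : PySem.Set Int × PySem.Dict Nat (PySem.Set Int)) jh =>
        let q1 := pvReachB N jh.1.toNat p.2
        let q2 := pvReachB N (c - jh.1.toNat) q1.2
        (PySem.Set.union
          (PySem.Set.union
            (PySem.Set.union
              (PySem.Set.union p.1 (pvPairsB (· + ·) q1.1 q2.1))
              (pvPairsB (· - ·) q1.1 q2.1))
            (pvPairsB (· * ·) q1.1 q2.1))
          (pvDivPairsB q1.1 q2.1), q2.2))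
      (PySem.Set.ofList [pvBase N c], memo)
    (p.1, p.2.insert c p.1)
termination_by c
decreasing_by
  · have h := (PySem.List.mem_pyRange_one).1 jh.2; omega
  · have h := (PySem.List.mem_pyRange_one).1 jh.2; omega

-- 'for c in range(1, 9): if number in reach(c): return c' with early return
def pvLoopB (N number : Int) (memo : PySem.Dict Nat (PySem.Set Int)) : List Int → Int
  | [] => -1
  | c :: rest =>
    let p := pvReachB N c.toNat memo
    if PySem.Set.contains p.1 number then c else pvLoopB N number p.2 rest

def solution_alt (N : Int) (number : Int) : Int :=
  pvLoopB N number PySem.Dict.empty (PySem.List.pyRange 1 9 1)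

-- ===== PRECONDITION & SPEC =====
-- Pre_ excludes N < 0, on which A raises ValueError: int(str(N)*i) for i ≥ 2 parses e.g. '-3-3'.
def Pre_solution (N : Int) (number : Int) : Prop := 0 ≤ N
instance (N : Int) (number : Int) : Decidable (Pre_solution N number) := by
  unfold Pre_solution; infer_instance

def pvWitness_solution : Int × Int := (5, 4)

def Spec_solution (N : Int) (number : Int) (out : Int) : Prop := out = solution_alt N number
instance (N : Int) (number : Int) (out : Int) : Decidable (Spec_solution N number out) := by
  unfold Spec_solution; infer_instance

-- ===== CLAIM (what is proved, stated in full; the proofs are below) =====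
def Claim_equal_solution : Prop := ∀ (N : Int) (number : Int), Dom_solution N number →
  Pre_solution N number → Spec_solution N number (solution N number)

-- ===== LEMMAS AND PROOFS =====

def pvGenP (v : Int) (P Q : Int → Prop) : Prop :=
  ∃ x, P x ∧ ∃ y, Q y ∧
    (v = x + y ∨ v = x - y ∨ v = x * y ∨ (y ≠ 0 ∧ v = PySem.Int.floordiv x y))

def pvMemR (N : Int) : Nat → Int → Prop
  | c, v => v = pvBase N c ∨
      ∃ j : Nat, ∃ _ : 1 ≤ j, ∃ _ : j < c, ∃ x, pvMemR N j x ∧ ∃ y, pvMemR N (c - j) y ∧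
        (v = x + y ∨ v = x - y ∨ v = x * y ∨ (y ≠ 0 ∧ v = PySem.Int.floordiv x y))
termination_by c _ => c

def pvGood (N : Int) (memo : PySem.Dict Nat (PySem.Set Int)) : Prop :=
  ∀ k s, memo.get? k = some s → ∀ v, v ∈ s ↔ pvMemR N k v

-- v is produced by one of the four operations from an x satisfying P and a y satisfying Q
-- (this block of proof-side definitions is below the claim; the claims do not mention it)

theorem pvMemR_iff (N : Int) (c : Nat) (v : Int) :
    pvMemR N c v ↔ v = pvBase N c ∨
      ∃ j : Nat, 1 ≤ j ∧ j < c ∧ pvGenP v (pvMemR N j) (pvMemR N (c - j)) := by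
  rw [pvMemR]
  simp only [pvGenP, exists_prop]

theorem mem_combineA_inner (x v : Int) (b : List Int) (s : PySem.Set Int) :
    v ∈ b.foldl (fun s y =>
        let s2 := PySem.Set.add (PySem.Set.add (PySem.Set.add s (x + y)) (x - y)) (x * y)
        if y ≠ 0 then PySem.Set.add s2 (PySem.Int.floordiv x y) else s2) s ↔
    v ∈ s ∨ ∃ y ∈ b, (v = x + y ∨ v = x - y ∨ v = x * y ∨ (y ≠ 0 ∧ v = PySem.Int.floordiv x y)) := by
  induction b generalizing s with
  | nil => simp
  | cons y t ih =>
    simp only [List.foldl_cons]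
    rw [ih]
    by_cases hy : y = 0
    · subst hy
      simp [PySem.Set.mem_add]
      aesop
    · simp [hy, PySem.Set.mem_add]
      aesop

theorem mem_combineA (v : Int) (s : PySem.Set Int) (a b : List Int) :
    v ∈ pvCombineA s a b ↔ v ∈ s ∨ pvGenP v (· ∈ a) (· ∈ b) := by
  unfold pvCombineA
  induction a generalizing s with
  | nil => simp [pvGenP]
  | cons x t ih =>
    simp only [List.foldl_cons]
    rw [ih, mem_combineA_inner]
    simp only [pvGenP, List.mem_cons]
    aesop

theorem mem_unionsB (v : Int) (res : PySem.Set Int) (a b : List Int) :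
    v ∈ PySem.Set.union
          (PySem.Set.union
            (PySem.Set.union
              (PySem.Set.union res (pvPairsB (· + ·) a b))
              (pvPairsB (· - ·) a b))
            (pvPairsB (· * ·) a b))
          (pvDivPairsB a b) ↔
    v ∈ res ∨ pvGenP v (· ∈ a) (· ∈ b) := by
  simp only [PySem.Set.mem_union, pvPairsB, pvDivPairsB, pvGenP, List.mem_flatMap,
    List.mem_map, List.mem_filter, decide_eq_true_eq]
  constructor
  · rintro ((((h | ⟨x,hx,y,hy,rfl⟩) | ⟨x,hx,y,hy,rfl⟩) | ⟨x,hx,y,hy,rfl⟩) | ⟨x,hx,y,⟨hy,hy0⟩,rfl⟩)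
    · exact Or.inl h
    · exact Or.inr ⟨x,hx,y,hy,Or.inl rfl⟩
    · exact Or.inr ⟨x,hx,y,hy,Or.inr (Or.inl rfl)⟩
    · exact Or.inr ⟨x,hx,y,hy,Or.inr (Or.inr (Or.inl rfl))⟩
    · exact Or.inr ⟨x,hx,y,hy,Or.inr (Or.inr (Or.inr ⟨hy0, rfl⟩))⟩
  · rintro (h | ⟨x,hx,y,hy,(rfl|rfl|rfl|⟨hy0,rfl⟩)⟩)
    · exact Or.inl (Or.inl (Or.inl (Or.inl h)))
    · exact Or.inl (Or.inl (Or.inl (Or.inr ⟨x,hx,y,hy,rfl⟩)))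
    · exact Or.inl (Or.inl (Or.inr ⟨x,hx,y,hy,rfl⟩))
    · exact Or.inl (Or.inr ⟨x,hx,y,hy,rfl⟩)
    · exact Or.inr ⟨x,hx,y,⟨hy,hy0⟩,rfl⟩

theorem pvGenP_congr {v : Int} {P P' Q Q' : Int → Prop}
    (hP : ∀ x, P x ↔ P' x) (hQ : ∀ y, Q y ↔ Q' y) :
    pvGenP v P Q ↔ pvGenP v P' Q' := by
  simp only [pvGenP, hP, hQ]

theorem pvFoldB_spec (N : Int) (c : Nat)
    (HIH : ∀ c', c' < c → ∀ memo, pvGood N memo →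
      (∀ v, v ∈ (pvReachB N c' memo).1 ↔ pvMemR N c' v) ∧ pvGood N (pvReachB N c' memo).2) :
    ∀ (l : List {x // x ∈ PySem.List.pyRange 1 (c : Int) 1}) (res : PySem.Set Int)
      (memo : PySem.Dict Nat (PySem.Set Int)), pvGood N memo →
    (∀ v, v ∈ (l.foldl
      (fun (p : PySem.Set Int × PySem.Dict Nat (PySem.Set Int)) jh =>
        have q1 := pvReachB N jh.1.toNat p.2
        have q2 := pvReachB N (c - jh.1.toNat) q1.2
        (PySem.Set.union
          (PySem.Set.union
            (PySem.Set.union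
              (PySem.Set.union p.1 (pvPairsB (· + ·) q1.1 q2.1))
              (pvPairsB (· - ·) q1.1 q2.1))
            (pvPairsB (· * ·) q1.1 q2.1))
          (pvDivPairsB q1.1 q2.1), q2.2)) (res, memo)).1 ↔
      v ∈ res ∨ ∃ jh ∈ l, pvGenP v (pvMemR N jh.1.toNat) (pvMemR N (c - jh.1.toNat))) ∧
    pvGood N (l.foldl
      (fun (p : PySem.Set Int × PySem.Dict Nat (PySem.Set Int)) jh =>
        have q1 := pvReachB N jh.1.toNat p.2
        have q2 := pvReachB N (c - jh.1.toNat) q1.2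
        (PySem.Set.union
          (PySem.Set.union
            (PySem.Set.union
              (PySem.Set.union p.1 (pvPairsB (· + ·) q1.1 q2.1))
              (pvPairsB (· - ·) q1.1 q2.1))
            (pvPairsB (· * ·) q1.1 q2.1))
          (pvDivPairsB q1.1 q2.1), q2.2)) (res, memo)).2 := by
  intro l
  induction l with
  | nil =>
    intro res memo hg
    exact And.intro (fun v => by simp) hg
  | cons jh t ih =>
    intro res memo hg
    have hjr := (PySem.List.mem_pyRange_one).1 jh.2
    have hj1 : jh.1.toNat < c := by omega
    have hj2 : c - jh.1.toNat < c := by omega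
    obtain ⟨hq1m, hq1g⟩ := HIH jh.1.toNat hj1 memo hg
    obtain ⟨hq2m, hq2g⟩ := HIH (c - jh.1.toNat) hj2 _ hq1g
    simp only [List.foldl_cons]
    obtain ⟨ihm, ihg⟩ := ih _ _ hq2g
    refine ⟨fun v => ?_, ihg⟩
    rw [ihm v, mem_unionsB]
    rw [pvGenP_congr hq1m hq2m]
    simp only [List.mem_cons]
    constructor
    · rintro ((h | h) | h)
      · exact Or.inl h
      · exact Or.inr ⟨jh, Or.inl rfl, h⟩
      · obtain ⟨u, hu, hgen⟩ := h; exact Or.inr ⟨u, Or.inr hu, hgen⟩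
    · rintro (h | ⟨u, (rfl | hu), hgen⟩)
      · exact Or.inl (Or.inl h)
      · exact Or.inl (Or.inr hgen)
      · exact Or.inr ⟨u, hu, hgen⟩

theorem pvReachB_spec (N : Int) : ∀ (c : Nat) (memo : PySem.Dict Nat (PySem.Set Int)),
    pvGood N memo →
    (∀ v, v ∈ (pvReachB N c memo).1 ↔ pvMemR N c v) ∧ pvGood N (pvReachB N c memo).2 := by
  intro c
  induction c using Nat.strong_induction_on with
  | _ c IH =>
    intro memo hg
    rw [pvReachB]
    split
    next s hm => exact And.intro (hg _ _ hm) hg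
    next hm =>
      obtain ⟨hfm, hfg⟩ := pvFoldB_spec N c (fun c' hc' => IH c' hc')
        ((PySem.List.pyRange 1 (c : Int) 1).attach) (PySem.Set.ofList [pvBase N c]) memo hg
      have hconv : ∀ v, (v ∈ PySem.Set.ofList [pvBase N c] ∨
            ∃ jh ∈ (PySem.List.pyRange 1 (c : Int) 1).attach,
              pvGenP v (pvMemR N jh.1.toNat) (pvMemR N (c - jh.1.toNat))) ↔ pvMemR N c v := by
        intro v
        rw [pvMemR_iff]
        have hbase : v ∈ PySem.Set.ofList [pvBase N c] ↔ v = pvBase N c := by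
            simp [PySem.Set.mem_ofList]
        rw [hbase]
        constructor
        · rintro (h | ⟨jh, _, hgen⟩)
          · exact Or.inl h
          · have hjr := (PySem.List.mem_pyRange_one).1 jh.2
            exact Or.inr ⟨jh.1.toNat, by omega, by omega, hgen⟩
        · rintro (h | ⟨j, hj1, hj2, hgen⟩)
          · exact Or.inl h
          · have hmem : ((j : Int)) ∈ PySem.List.pyRange 1 (c : Int) 1 := by
              rw [PySem.List.mem_pyRange_one]; omega
            refine Or.inr ⟨⟨(j : Int), hmem⟩, List.mem_attach _ _, ?_⟩
            simpa using hgen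
      have hmemb := fun v => (hfm v).trans (hconv v)
      refine And.intro (fun v => hmemb v) (fun k s hk => ?_)
      have hk2 : ((((PySem.List.pyRange 1 (c : Int) 1).attach.foldl (fun (p : PySem.Set Int × PySem.Dict Nat (PySem.Set Int)) jh =>
        have q1 := pvReachB N jh.1.toNat p.2
        have q2 := pvReachB N (c - jh.1.toNat) q1.2
        (PySem.Set.union
          (PySem.Set.union
            (PySem.Set.union
              (PySem.Set.union p.1 (pvPairsB (· + ·) q1.1 q2.1))
              (pvPairsB (· - ·) q1.1 q2.1))
            (pvPairsB (· * ·) q1.1 q2.1))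
          (pvDivPairsB q1.1 q2.1), q2.2)) (PySem.Set.ofList [pvBase N c], memo))).2.insert c (((PySem.List.pyRange 1 (c : Int) 1).attach.foldl (fun (p : PySem.Set Int × PySem.Dict Nat (PySem.Set Int)) jh =>
        have q1 := pvReachB N jh.1.toNat p.2
        have q2 := pvReachB N (c - jh.1.toNat) q1.2
        (PySem.Set.union
          (PySem.Set.union
            (PySem.Set.union
              (PySem.Set.union p.1 (pvPairsB (· + ·) q1.1 q2.1))
              (pvPairsB (· - ·) q1.1 q2.1))
            (pvPairsB (· * ·) q1.1 q2.1))
          (pvDivPairsB q1.1 q2.1), q2.2)) (PySem.Set.ofList [pvBase N c], memo))).1).get? k = some s := hk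
      by_cases hkc : k = c
      · subst hkc
        rw [PySem.Dict.get?_insert_self] at hk2
        cases hk2
        exact hmemb
      · rw [PySem.Dict.get?_insert_of_ne _ _ hkc] at hk2
        exact hfg _ _ hk2

-- ===== A side =====

theorem pvGetD_set_of_ne (xs : List (PySem.Set Int)) (n : Nat) (S : PySem.Set Int) (i : Int)
    (h0 : 0 ≤ i) (hlt : i < (xs.length : Int)) (hne : i.toNat ≠ n) :
    PySem.List.pyGetD (xs.set n S) i [] = xs.getD i.toNat [] := by
  rw [PySem.List.pyGetD_eq_getElem _ _ h0 (by simpa using hlt)]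
  rw [List.getElem_set_ne (Ne.symm hne)]
  rw [List.getD_eq_getElem _ _ (by omega)]

theorem pvGetD_set_self (xs : List (PySem.Set Int)) (n : Nat) (S : PySem.Set Int)
    (hlt : n < xs.length) :
    PySem.List.pyGetD (xs.set n S) (n : Int) [] = S := by
  rw [PySem.List.pyGetD_eq_getElem _ _ (by omega) (by simpa using hlt)]
  simp

theorem pvStepA_fold_spec (dp : List (PySem.Set Int)) (k : Nat) (hk : k < dp.length) :
    ∀ (l : List Int), (∀ j ∈ l, 0 ≤ j ∧ j < (k : Int)) →
    ∃ S, l.foldl (fun dp j =>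
        PySem.List.pySetD dp (k : Int)
          (pvCombineA (PySem.List.pyGetD dp (k : Int) []) (PySem.List.pyGetD dp j [])
            (PySem.List.pyGetD dp ((k : Int) - j - 1) []))) dp = dp.set k S ∧
      (∀ v, v ∈ S ↔ v ∈ dp.getD k [] ∨
        ∃ j ∈ l, pvGenP v (· ∈ dp.getD j.toNat []) (· ∈ dp.getD ((k : Int) - j - 1).toNat [])) := by
  intro l
  induction l using List.reverseRecOn with
  | nil =>
    intro _
    refine ⟨dp.getD k [], ?_, by simp⟩
    simp only [List.foldl_nil]
    rw [List.getD_eq_getElem _ _ hk]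
    exact (List.set_getElem_self hk).symm
  | append_singleton l j ihl =>
    intro hmem
    obtain ⟨S, hS, hSm⟩ := ihl (fun x hx => hmem x (List.mem_append_left _ hx))
    have hj := hmem j (List.mem_append_right _ (List.mem_singleton.2 rfl))
    refine ⟨pvCombineA S (dp.getD j.toNat []) (dp.getD ((k : Int) - j - 1).toNat []), ?_, ?_⟩
    · rw [List.foldl_append, hS]
      simp only [List.foldl_cons, List.foldl_nil]
      have e1 : PySem.List.pyGetD (dp.set k S) (k : Int) [] = S := pvGetD_set_self dp k S hk
      have e2 : PySem.List.pyGetD (dp.set k S) j [] = dp.getD j.toNat [] :=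
        pvGetD_set_of_ne dp k S j (by omega) (by omega) (by omega)
      have e3 : PySem.List.pyGetD (dp.set k S) ((k : Int) - j - 1) [] =
          dp.getD ((k : Int) - j - 1).toNat [] :=
        pvGetD_set_of_ne dp k S _ (by omega) (by omega) (by omega)
      rw [e1, e2, e3, PySem.List.pySetD_natCast, List.set_set]
    · intro v
      rw [mem_combineA, hSm v]
      simp only [List.mem_append, List.mem_singleton]
      constructor
      · rintro ((h | ⟨u, hu, hgen⟩) | h)
        · exact Or.inl h
        · exact Or.inr ⟨u, Or.inl hu, hgen⟩
        · exact Or.inr ⟨j, Or.inr rfl, h⟩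
      · rintro (h | ⟨u, (hu | rfl), hgen⟩)
        · exact Or.inl (Or.inl h)
        · exact Or.inl (Or.inr ⟨u, hu, hgen⟩)
        · exact Or.inr hgen

def pvInvA (N : Int) (k : Nat) (dp : List (PySem.Set Int)) : Prop :=
  dp.length = 8 ∧ ∀ i : Nat, i < 8 →
    (i < k → ∀ v, v ∈ dp.getD i [] ↔ pvMemR N (i + 1) v) ∧
    (k ≤ i → dp.getD i [] = PySem.Set.ofList [pvBase N (i + 1)])

theorem pvLoop_eq (N number : Int) : ∀ (n k : Nat), k + n = 8 →
    ∀ (dp : List (PySem.Set Int)) (memo : PySem.Dict Nat (PySem.Set Int)),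
    pvInvA N k dp → pvGood N memo →
    pvLoopA number dp (PySem.List.pyRange (k : Int) 8 1) =
      pvLoopB N number memo (PySem.List.pyRange ((k : Int) + 1) 9 1) := by
  intro n
  induction n with
  | zero =>
    intro k hk dp memo _ _
    have h8 : (k : Int) = 8 := by omega
    rw [h8]
    rw [PySem.List.pyRange_one_eq_nil (by omega), PySem.List.pyRange_one_eq_nil (by omega)]
    rw [pvLoopA, pvLoopB]
  | succ n ihn =>
    intro k hk dp memo hinv hg
    have hklt : k < 8 := by omega
    obtain ⟨hlen, hindex⟩ := hinv
    -- unfold one iteration on each side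
    rw [PySem.List.pyRange_one_cons (by omega : (k : Int) < 8),
        PySem.List.pyRange_one_cons (by omega : (k : Int) + 1 < 9)]
    rw [pvLoopA, pvLoopB]
    -- characterize pvStepA dp k
    obtain ⟨S, hS, hSm⟩ := pvStepA_fold_spec dp k (by omega)
      (PySem.List.pyRange 0 (k : Int) 1)
      (fun j hj => by have := (PySem.List.mem_pyRange_one).1 hj; omega)
    have hstep : pvStepA dp (k : Int) = dp.set k S := by
      unfold pvStepA; exact hS
    -- the k-th entry of the new dp has the members of pvMemR N (k+1)
    have hgetk : PySem.List.pyGetD (dp.set k S) (k : Int) [] = S := by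
      rw [PySem.List.pyGetD_natCast]
      simp [List.getD, hklt, hlen]
    have hSmem : ∀ v, v ∈ S ↔ pvMemR N (k + 1) v := by
      intro v
      rw [hSm v, pvMemR_iff]
      have hbase : dp.getD k [] = PySem.Set.ofList [pvBase N (k + 1)] :=
        (hindex k hklt).2 (le_refl k)
      rw [hbase]
      have hb2 : v ∈ PySem.Set.ofList [pvBase N (k + 1)] ↔ v = pvBase N (k + 1) := by
        simp [PySem.Set.mem_ofList]
      rw [hb2]
      constructor
      · rintro (h | ⟨j, hj, hgen⟩)
        · exact Or.inl h
        · have hjr := (PySem.List.mem_pyRange_one).1 hj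
          refine Or.inr ⟨j.toNat + 1, by omega, by omega, ?_⟩
          have hA : ∀ v, v ∈ dp.getD j.toNat [] ↔ pvMemR N (j.toNat + 1) v :=
            (hindex j.toNat (by omega)).1 (by omega)
          have hB : ∀ v, v ∈ dp.getD ((k : Int) - j - 1).toNat [] ↔
              pvMemR N (((k : Int) - j - 1).toNat + 1) v :=
            (hindex ((k : Int) - j - 1).toNat (by omega)).1 (by omega)
          have harith : ((k : Int) - j - 1).toNat + 1 = k + 1 - (j.toNat + 1) := by omega
          rw [harith] at hB
          exact (pvGenP_congr hA hB).1 hgen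
      · rintro (h | ⟨j', hj1, hj2, hgen⟩)
        · exact Or.inl h
        · have hjmem : ((j' - 1 : Nat) : Int) ∈ PySem.List.pyRange 0 (k : Int) 1 := by
            rw [PySem.List.mem_pyRange_one]; omega
          refine Or.inr ⟨((j' - 1 : Nat) : Int), hjmem, ?_⟩
          have hA : ∀ v, v ∈ dp.getD ((j' - 1 : Nat) : Int).toNat [] ↔ pvMemR N j' v := by
            have e : ((j' - 1 : Nat) : Int).toNat = j' - 1 := by omega
            rw [e]
            have e2 : j' - 1 + 1 = j' := by omega
            intro v
            rw [(hindex (j' - 1) (by omega)).1 (by omega) v, e2]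
          have hB : ∀ v, v ∈ dp.getD ((k : Int) - ((j' - 1 : Nat) : Int) - 1).toNat [] ↔
              pvMemR N (k + 1 - j') v := by
            have e : ((k : Int) - ((j' - 1 : Nat) : Int) - 1).toNat = k - j' := by omega
            rw [e]
            have e2 : k - j' + 1 = k + 1 - j' := by omega
            intro v
            rw [(hindex (k - j') (by omega)).1 (by omega) v, e2]
          exact (pvGenP_congr (fun v => (hA v).symm) (fun v => (hB v).symm)).1 hgen
    -- the B side set
    have hcnat : ((k : Int) + 1).toNat = k + 1 := by omega
    obtain ⟨hrm, hrg⟩ := pvReachB_spec N (((k : Int) + 1).toNat) memo hg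
    -- contains agree
    have hcont : PySem.Set.contains (PySem.List.pyGetD (pvStepA dp (k : Int)) (k : Int) []) number =
        PySem.Set.contains (pvReachB N (((k : Int) + 1).toNat) memo).1 number := by
      rw [hstep, hgetk]
      rw [Bool.eq_iff_iff, PySem.Set.contains_iff, PySem.Set.contains_iff]
      rw [hSmem number]
      have hrm2 := hrm number
      rw [hcnat] at hrm2
      simp only [hcnat]
      exact hrm2.symm
    rw [hcont]
    cases hc : PySem.Set.contains (pvReachB N (((k : Int) + 1).toNat) memo).1 number with
    | true => simp
    | false =>
      simp only [Bool.false_eq_true, if_false]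
      have hinv' : pvInvA N (k + 1) (pvStepA dp (k : Int)) := by
        rw [hstep]
        refine ⟨by simpa using hlen, ?_⟩
        intro i hi
        constructor
        · intro hik v
          by_cases hik2 : i = k
          · rw [hik2]
            have hkl : k < dp.length := by omega
            have hget : (dp.set k S).getD k [] = S := by
              simp [List.getD, hkl]
            rw [hget]
            exact hSmem v
          · have : (dp.set k S).getD i [] = dp.getD i [] := by
              simp [List.getD, List.getElem?_set_ne (by omega : k ≠ i)]
            rw [this]
            exact (hindex i hi).1 (by omega) v
        · intro hik
          have : (dp.set k S).getD i [] = dp.getD i [] := by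
            simp [List.getD, List.getElem?_set_ne (by omega : k ≠ i)]
          rw [this]
          exact (hindex i hi).2 (by omega)
      have hrec := ihn (k + 1) (by omega) (pvStepA dp (k : Int))
        (pvReachB N (((k : Int) + 1).toNat) memo).2 hinv' hrg
      have hcast : ((k + 1 : Nat) : Int) = (k : Int) + 1 := by push_cast; ring
      rw [hcast] at hrec
      rw [hrec]

-- initial dp and conclusions

theorem solution_spec : Claim_equal_solution := by
  intro N number _ _
  unfold Spec_solution solution solution_alt
  have hinit : (PySem.List.pyRange 1 9 1).foldl
      (fun dp i => dp ++ [PySem.Set.ofList [pvBase N i.toNat]]) [] =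
      [PySem.Set.ofList [pvBase N 1], PySem.Set.ofList [pvBase N 2], PySem.Set.ofList [pvBase N 3],
       PySem.Set.ofList [pvBase N 4], PySem.Set.ofList [pvBase N 5], PySem.Set.ofList [pvBase N 6],
       PySem.Set.ofList [pvBase N 7], PySem.Set.ofList [pvBase N 8]] := rfl
  rw [hinit]
  have hinv : pvInvA N 0
      [PySem.Set.ofList [pvBase N 1], PySem.Set.ofList [pvBase N 2], PySem.Set.ofList [pvBase N 3],
       PySem.Set.ofList [pvBase N 4], PySem.Set.ofList [pvBase N 5], PySem.Set.ofList [pvBase N 6],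
       PySem.Set.ofList [pvBase N 7], PySem.Set.ofList [pvBase N 8]] := by
    refine ⟨rfl, ?_⟩
    intro i hi
    refine ⟨by omega, fun _ => ?_⟩
    interval_cases i <;> rfl
  have hg : pvGood N PySem.Dict.empty := by
    intro k s h
    rw [PySem.Dict.get?_empty] at h
    cases h
  have := pvLoop_eq N number 8 0 rfl _ PySem.Dict.empty hinv hg
  simpa using this

-- ===== VERDICT (by name: the statement is the Claim_ definition above) =====
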